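-- pv_equiv track=rewrite | github.com/sancern-zhou/suyuan | backend/app/tools/utility/bash_tool.py | extract_unquoted_content
-- ===== SOURCE A (Python) =====
-- from typing import Dict, Any, Optional, List, Tuple
--
-- def extract_unquoted_content(command: str) -> Tuple[str, str, str]:
--     """
--     提取命令的不同内容版本，用于多层级验证
--
--     Args:
--         command: 原始命令
--
--     Returns:
--         (unquoted_content, fully_unquoted, unquoted_keep_quotes)
--         - unquoted_content: 移除双引号内容（保留单引号内容）
--         - fully_unquoted: 移除所有引号内容
--         - unquoted_keep_quotes: 移除引号内容但保留引号字符
--     """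
--     unquoted_content = ""
--     fully_unquoted = ""
--     unquoted_keep_quotes = ""
--
--     in_single_quote = False
--     in_double_quote = False
--     escaped = False
--
--     for c in command:
--         if escaped:
--             escaped = False
--             if not in_single_quote:
--                 unquoted_content += c
--             if not in_single_quote and not in_double_quote:
--                 fully_unquoted += c
--             unquoted_keep_quotes += c
--             continue
--
--         if c == '\\':
--             if not in_single_quote:
--                 escaped = True
--             if not in_single_quote:
--                 unquoted_content += c
--             if not in_single_quote and not in_double_quote:
--                 fully_unquoted += c
--             unquoted_keep_quotes += c
--             continue
--
--         if c == "'" and not in_double_quote: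
--             in_single_quote = not in_single_quote
--             unquoted_keep_quotes += c
--             continue
--
--         if c == '"' and not in_single_quote:
--             in_double_quote = not in_double_quote
--             unquoted_keep_quotes += c
--             continue
--
--         if not in_single_quote:
--             unquoted_content += c
--         if not in_single_quote and not in_double_quote:
--             fully_unquoted += c
--         unquoted_keep_quotes += c
--
--     return unquoted_content, fully_unquoted, unquoted_keep_quotes
-- ===== SOURCE B (Python) =====
-- from typing import Tuple
--
--
-- def extract_unquoted_content(command: str) -> Tuple[str, str, str]:
--     # Segment-based parser: instead of a per-character boolean state machine,
--     # consume whole quoted segments with inner index loops. Single-quoted runs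
--     # are skipped entirely; double-quoted runs (with backslash escapes) go only
--     # into the first output; top-level characters go into both. The keep-quotes
--     # variant keeps every character, so it equals the input itself.
--     out_u = []
--     out_f = []
--     i, n = 0, len(command)
--     while i < n:
--         c = command[i]
--         if c == '\\':
--             out_u.append(c)
--             out_f.append(c)
--             i += 1
--             if i < n:
--                 out_u.append(command[i])
--                 out_f.append(command[i])
--                 i += 1
--         elif c == "'":
--             i += 1
--             while i < n and command[i] != "'":
--                 i += 1
--             i += 1
--         elif c == '"':
--             i += 1
--             while i < n and command[i] != '"':
--                 if command[i] == '\\':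
--                     out_u.append('\\')
--                     i += 1
--                     if i < n:
--                         out_u.append(command[i])
--                         i += 1
--                 else:
--                     out_u.append(command[i])
--                     i += 1
--             i += 1
--         else:
--             out_u.append(c)
--             out_f.append(c)
--             i += 1
--     return ''.join(out_u), ''.join(out_f), command
-- ===== Notes on version B (the rewrite author's own statement) =====
-- stated objective: alternative
-- what changed: Replaces A's single per-character loop over three boolean state flags with a segment-based parser: an outer index loop that, on meeting a quote, hands control to a dedicated inner loop consuming the whole single-quoted (skipped) or double-quoted (collected with escapes) run, and returns the input itself as the keep-quotes variant that A rebuilds character by character.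
import Mathlib
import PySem

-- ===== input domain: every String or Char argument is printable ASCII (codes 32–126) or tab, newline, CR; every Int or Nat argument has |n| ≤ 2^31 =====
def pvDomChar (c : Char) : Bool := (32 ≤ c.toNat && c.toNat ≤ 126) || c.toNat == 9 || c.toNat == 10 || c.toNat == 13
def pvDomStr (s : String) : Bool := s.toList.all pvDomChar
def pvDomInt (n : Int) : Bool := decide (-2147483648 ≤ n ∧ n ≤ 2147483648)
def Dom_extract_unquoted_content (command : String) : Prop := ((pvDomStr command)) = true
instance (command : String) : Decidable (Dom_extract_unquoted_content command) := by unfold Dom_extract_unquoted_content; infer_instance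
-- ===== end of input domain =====

-- B replaces A's per-character boolean state machine by a segment-based parser that
-- consumes whole quoted runs with dedicated inner loops and returns the input itself
-- as the keep-quotes variant; objective: alternative (same O(n) cost, different structure).

-- ===== PORT A =====
-- A's single loop over the characters, carrying the three output strings and
-- the (in_single_quote, in_double_quote, escaped) state, branch for branch.
def euqA_loop : List Char → List Char → List Char → List Char → Bool → Bool → Bool →
    List Char × List Char × List Char
  | [], unq, full, keep, _, _, _ => (unq, full, keep)
  | c :: cs, unq, full, keep, s, d, e =>
    if e then
      euqA_loop cs (if !s then unq ++ [c] else unq)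
        (if !s && !d then full ++ [c] else full) (keep ++ [c]) s d false
    else if c = '\\' then
      euqA_loop cs (if !s then unq ++ [c] else unq)
        (if !s && !d then full ++ [c] else full) (keep ++ [c]) s d (!s)
    else if c = '\'' ∧ d = false then
      euqA_loop cs unq full (keep ++ [c]) (!s) d e
    else if c = '"' ∧ s = false then
      euqA_loop cs unq full (keep ++ [c]) s (!d) e
    else
      euqA_loop cs (if !s then unq ++ [c] else unq)
        (if !s && !d then full ++ [c] else full) (keep ++ [c]) s d e

def extract_unquoted_content (command : String) : String × String × String :=
  let r := euqA_loop command.toList [] [] [] false false false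
  (String.ofList r.1, String.ofList r.2.1, String.ofList r.2.2)

-- ===== PORT B =====
-- B's inner loop for a single-quoted run: skip up to (and over) the closing quote.
def euqB_skipSingle : List Char → List Char
  | [] => []
  | c :: cs => if c = '\'' then cs else euqB_skipSingle cs

-- B's inner loop for a double-quoted run: collect its content (with escapes) and
-- return it together with the remaining input after the closing quote.
def euqB_double : List Char → List Char × List Char
  | [] => ([], [])
  | c :: cs =>
    if c = '"' then ([], cs)
    else if c = '\\' then
      match cs with
      | [] => (['\\'], [])
      | c2 :: cs2 => let r := euqB_double cs2; ('\\' :: c2 :: r.1, r.2)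
    else
      let r := euqB_double cs; (c :: r.1, r.2)

-- Termination facts the top-level loop needs: both inner loops return a suffix.
theorem euqB_skipSingle_le (cs : List Char) : (euqB_skipSingle cs).length ≤ cs.length := by
  induction cs with
  | nil => simp [euqB_skipSingle]
  | cons c cs ih => by_cases h : c = '\'' <;> simp [euqB_skipSingle, h] <;> omega

theorem euqB_double_le (cs : List Char) : (euqB_double cs).2.length ≤ cs.length := by
  induction cs using euqB_double.induct with
  | case1 => simp [euqB_double]
  | case2 cs => rw [euqB_double.eq_def]; simp
  | case3 h => rw [euqB_double.eq_def]; simp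
  | case4 c cs h ih => rw [euqB_double.eq_def]; simp; omega
  | case5 c cs h1 h2 ih => rw [euqB_double.eq_def]; simp [h1, h2]; omega

-- B's top-level loop: escapes and plain characters go into both outputs; a quote
-- character hands the rest of the input to the matching inner loop.
def euqB_main : List Char → List Char × List Char
  | [] => ([], [])
  | c :: cs =>
    if c = '\\' then
      match cs with
      | [] => (['\\'], ['\\'])
      | c2 :: cs2 => let r := euqB_main cs2; ('\\' :: c2 :: r.1, '\\' :: c2 :: r.2)
    else if c = '\'' then
      euqB_main (euqB_skipSingle cs)
    else if c = '"' then
      let r := euqB_double cs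
      let m := euqB_main r.2
      (r.1 ++ m.1, m.2)
    else
      let r := euqB_main cs; (c :: r.1, c :: r.2)
  termination_by cs => cs.length
  decreasing_by
  · simp
  · have := euqB_skipSingle_le cs; simp; omega
  · have := euqB_double_le cs; simp; omega
  · simp

def extract_unquoted_content_alt (command : String) : String × String × String :=
  let r := euqB_main command.toList
  (String.ofList r.1, String.ofList r.2, command)

-- ===== PRECONDITION & SPEC =====
def Spec_extract_unquoted_content (command : String) (out : String × String × String) : Prop := out = extract_unquoted_content_alt command
instance (command : String) (out : String × String × String) : Decidable (Spec_extract_unquoted_content command out) := by unfold Spec_extract_unquoted_content; infer_instance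

-- ===== CLAIM (what is proved, stated in full; the proofs are below) =====
def Claim_equal_extract_unquoted_content : Prop := ∀ (command : String), Dom_extract_unquoted_content command → Spec_extract_unquoted_content command (extract_unquoted_content command)

-- ===== LEMMAS AND PROOFS =====

-- Proof-only intermediate: a flag-annotated scan of A's state machine; A's loop
-- result is its filtered projections, and B's segment parser computes the same.
def euqScan : List Char → Bool → Bool → Bool → List (Char × Bool × Bool)
  | [], _, _, _ => []
  | c :: cs, s, d, e =>
    if e then (c, !s, !s && !d) :: euqScan cs s d false
    else if c = '\\' then (c, !s, !s && !d) :: euqScan cs s d (!s)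
    else if c = '\'' ∧ d = false then euqScan cs (!s) d e
    else if c = '"' ∧ s = false then euqScan cs s (!d) e
    else (c, !s, !s && !d) :: euqScan cs s d e

theorem euqA_loop_eq_scan (cs : List Char) :
    ∀ (unq full keep : List Char) (s d e : Bool),
    euqA_loop cs unq full keep s d e =
      (unq ++ ((euqScan cs s d e).filter (fun t => t.2.1)).map (fun t => t.1),
       full ++ ((euqScan cs s d e).filter (fun t => t.2.2)).map (fun t => t.1),
       keep ++ cs) := by
  induction cs with
  | nil => intro unq full keep s d e; simp [euqA_loop, euqScan]
  | cons c cs ih =>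
    intro unq full keep s d e
    cases e with
    | true => cases s <;> cases d <;> simp [euqA_loop, euqScan, ih, List.append_assoc]
    | false =>
      by_cases hb : c = '\\'
      · subst hb
        cases s <;> cases d <;> simp [euqA_loop, euqScan, ih, List.append_assoc]
      · by_cases hs : c = '\'' ∧ d = false
        · obtain ⟨hc, hd0⟩ := hs; subst hc; subst hd0
          simp [euqA_loop, euqScan, hb, ih, List.append_assoc]
        · by_cases hd : c = '"' ∧ s = false
          · obtain ⟨hc, hs0⟩ := hd; subst hc; subst hs0
            cases d <;> simp [euqA_loop, euqScan, hb, ih, List.append_assoc]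
          · by_cases h1 : c = '\'' <;> by_cases h2 : c = '"' <;>
              cases s <;> cases d <;>
              simp_all [euqA_loop, euqScan, List.append_assoc]

-- Inside a single-quoted run the scan emits only dropped characters, up to the
-- closing quote; so its filtered projections are those of the rest of the input.
theorem euqScan_single (cs : List Char) :
    (euqScan cs true false false).filter (fun t => t.2.1) =
      (euqScan (euqB_skipSingle cs) false false false).filter (fun t => t.2.1) ∧
    (euqScan cs true false false).filter (fun t => t.2.2) =
      (euqScan (euqB_skipSingle cs) false false false).filter (fun t => t.2.2) := by
  induction cs with
  | nil => simp [euqScan, euqB_skipSingle]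
  | cons c cs ih =>
    by_cases h1 : c = '\''
    · subst h1; simp [euqScan, euqB_skipSingle]
    · by_cases h2 : c = '\\' <;> simp_all [euqScan, euqB_skipSingle]

-- Inside a double-quoted run the scan emits exactly the characters euqB_double
-- collects, flagged for the first output only, up to the closing quote.
theorem euqScan_double (cs : List Char) :
    ((euqScan cs false true false).filter (fun t => t.2.1)).map (fun t => t.1) =
      (euqB_double cs).1 ++
        ((euqScan (euqB_double cs).2 false false false).filter (fun t => t.2.1)).map (fun t => t.1) ∧
    (euqScan cs false true false).filter (fun t => t.2.2) =
      (euqScan (euqB_double cs).2 false false false).filter (fun t => t.2.2) := by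
  induction cs using euqB_double.induct with
  | case1 => simp [euqScan, euqB_double]
  | case2 cs => rw [euqB_double.eq_def]; simp [euqScan]
  | case3 h => rw [euqB_double.eq_def]; simp [euqScan]
  | case4 c cs h ih => rw [euqB_double.eq_def]; simp [euqScan, ih.1, ih.2]
  | case5 c cs h1 h2 ih => rw [euqB_double.eq_def]; simp [euqScan, h1, h2, ih.1, ih.2]

-- B's top-level loop computes the filtered projections of A's scan.
theorem euqB_main_eq_scan (cs : List Char) :
    euqB_main cs =
      (((euqScan cs false false false).filter (fun t => t.2.1)).map (fun t => t.1),
       ((euqScan cs false false false).filter (fun t => t.2.2)).map (fun t => t.1)) := by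
  induction cs using euqB_main.induct with
  | case1 => simp [euqB_main, euqScan]
  | case2 => rw [euqB_main.eq_def]; simp [euqScan]
  | case3 c cs ih => rw [euqB_main.eq_def]; simp [euqScan, ih]
  | case4 cs h ih =>
    rw [euqB_main.eq_def]
    have hs := euqScan_single cs
    simp [euqScan, ih, hs.1, hs.2]
  | case5 cs r h1 h2 ih =>
    rw [euqB_main.eq_def]
    have hd := euqScan_double cs
    have ih' : euqB_main (euqB_double cs).2 =
        (((euqScan (euqB_double cs).2 false false false).filter (fun t => t.2.1)).map (fun t => t.1),
         ((euqScan (euqB_double cs).2 false false false).filter (fun t => t.2.2)).map (fun t => t.1)) := ih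
    simp [euqScan, ih', hd.1, hd.2]
  | case6 c cs h1 h2 h3 ih =>
    rw [euqB_main.eq_def]; simp [euqScan, h1, h2, h3, ih]

-- ===== VERDICT (by name: the statement is the Claim_ definition above) =====
theorem extract_unquoted_content_spec : Claim_equal_extract_unquoted_content := by
  intro command _
  unfold Spec_extract_unquoted_content extract_unquoted_content extract_unquoted_content_alt
  simp [euqA_loop_eq_scan, euqB_main_eq_scan]
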